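-- pv_equiv track=rewrite | github.com/nlp-noob/dialog_rank | RewardForRank/utils/rank_metrics.py | _collate_groups
-- ===== SOURCE A (Python) =====
-- def _collate_groups(true_labels, scores, group_id_list):
--     true_labels_groups = []
--     scores_groups = []
--     last_group_id = None
--     true_labels_group = []
--     scores_group = []
--
--     for true_label, score, group_id in zip(true_labels, scores, group_id_list):
--
--         if last_group_id is None or last_group_id == group_id:
--             true_labels_group.append(true_label)
--             scores_group.append(score)
--         else:
--             true_labels_groups.append(true_labels_group)
--             scores_groups.append(scores_group)
--             true_labels_group = [true_label]
--             scores_group = [score]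
--
--         last_group_id = group_id
--     if len(scores_group) > 0:
--         true_labels_groups.append(true_labels_group)
--         scores_groups.append(scores_group)
--     return true_labels_groups, scores_groups
-- ===== SOURCE B (Python) =====
-- def _collate_groups(true_labels, scores, group_id_list):
--     triples = list(zip(true_labels, scores, group_id_list))
--     true_labels_groups = []
--     scores_groups = []
--     i, n = 0, len(triples)
--     while i < n:
--         g = triples[i][2]
--         j = i + 1
--         while j < n and triples[j][2] == g:
--             j += 1
--         true_labels_groups.append([t[0] for t in triples[i:j]])
--         scores_groups.append([t[1] for t in triples[i:j]])
--         i = j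
--     return true_labels_groups, scores_groups
-- ===== Notes on version B (the rewrite author's own statement) =====
-- stated objective: alternative
-- what changed: B replaces A's single accumulator pass (running group + last_group_id sentinel + post-loop flush) with run-splitting: it zips once and repeatedly scans out each maximal run of equal group_ids, emitting each run's labels and scores directly, with no sentinel and no flush.
import Mathlib
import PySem

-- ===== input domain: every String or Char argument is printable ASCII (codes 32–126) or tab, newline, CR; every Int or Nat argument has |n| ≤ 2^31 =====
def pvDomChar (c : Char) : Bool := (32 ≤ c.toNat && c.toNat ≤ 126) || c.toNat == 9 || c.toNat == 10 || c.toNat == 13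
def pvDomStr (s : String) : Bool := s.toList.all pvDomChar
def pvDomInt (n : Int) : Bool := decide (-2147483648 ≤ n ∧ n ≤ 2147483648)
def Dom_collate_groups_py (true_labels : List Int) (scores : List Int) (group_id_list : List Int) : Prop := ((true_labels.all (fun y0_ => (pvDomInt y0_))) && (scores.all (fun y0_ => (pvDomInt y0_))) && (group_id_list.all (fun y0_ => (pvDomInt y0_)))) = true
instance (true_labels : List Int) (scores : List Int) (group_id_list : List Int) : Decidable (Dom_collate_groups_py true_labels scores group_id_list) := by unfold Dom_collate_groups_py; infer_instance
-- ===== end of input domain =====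

-- B replaces A's accumulator pass with run-splitting over the zipped triples; same O(n) cost, different decomposition.

-- ===== PORT A =====
-- state: (true_labels_groups, scores_groups, last_group_id, true_labels_group, scores_group)
def pvStepA (st : List (List Int) × List (List Int) × Option Int × List Int × List Int)
    (x : Int × Int × Int) : List (List Int) × List (List Int) × Option Int × List Int × List Int :=
  let (tgs, sgs, last, ct, cs) := st
  let (t, s, g) := x
  if last = none ∨ last = some g then
    (tgs, sgs, some g, ct ++ [t], cs ++ [s])
  else
    (tgs ++ [ct], sgs ++ [cs], some g, [t], [s])

def pvFinalA (st : List (List Int) × List (List Int) × Option Int × List Int × List Int) :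
    List (List Int) × List (List Int) :=
  if st.2.2.2.2.length > 0 then (st.1 ++ [st.2.2.2.1], st.2.1 ++ [st.2.2.2.2])
  else (st.1, st.2.1)

def collate_groups_py (true_labels : List Int) (scores : List Int) (group_id_list : List Int) : List (List Int) × List (List Int) :=
  pvFinalA ((true_labels.zip (scores.zip group_id_list)).foldl pvStepA ([], [], none, [], []))

-- ===== PORT B =====
-- run-splitting: B's inner "while j < n and triples[j][2] == g" scan is the takeWhile/dropWhile split
def pvRuns (l : List (Int × Int × Int)) : List (List Int) × List (List Int) :=
  match l with
  | [] => ([], [])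
  | (t, s, g) :: rest =>
    let run := rest.takeWhile (fun x => x.2.2 == g)
    let p := pvRuns (rest.dropWhile (fun x => x.2.2 == g))
    ((t :: run.map (·.1)) :: p.1, (s :: run.map (·.2.1)) :: p.2)
termination_by l.length
decreasing_by
  exact Nat.lt_succ_of_le (List.length_dropWhile_le _ _)

def collate_groups_py_alt (true_labels : List Int) (scores : List Int) (group_id_list : List Int) : List (List Int) × List (List Int) :=
  pvRuns (true_labels.zip (scores.zip group_id_list))

-- ===== PRECONDITION & SPEC =====
def Spec_collate_groups_py (true_labels : List Int) (scores : List Int) (group_id_list : List Int) (out : List (List Int) × List (List Int)) : Prop := out = collate_groups_py_alt true_labels scores group_id_list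
instance (true_labels : List Int) (scores : List Int) (group_id_list : List Int) (out : List (List Int) × List (List Int)) : Decidable (Spec_collate_groups_py true_labels scores group_id_list out) := by unfold Spec_collate_groups_py; infer_instance

-- ===== CLAIM (what is proved, stated in full; the proofs are below) =====
def Claim_equal_collate_groups_py : Prop := ∀ (true_labels : List Int) (scores : List Int) (group_id_list : List Int), Dom_collate_groups_py true_labels scores group_id_list → Spec_collate_groups_py true_labels scores group_id_list (collate_groups_py true_labels scores group_id_list)

-- ===== LEMMAS AND PROOFS =====

-- Invariant: once the loop has started (last = some g, current groups nonempty), finalizing the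
-- rest of the fold appends "current group extended by the run of g" and then the runs of the rest.
theorem pvLoop (l : List (Int × Int × Int)) :
    ∀ (atg asg : List (List Int)) (g : Int) (ct cs : List Int), cs ≠ [] →
    pvFinalA (l.foldl pvStepA (atg, asg, some g, ct, cs))
      = (atg ++ (ct ++ (l.takeWhile (fun x => x.2.2 == g)).map (·.1)) :: (pvRuns (l.dropWhile (fun x => x.2.2 == g))).1,
         asg ++ (cs ++ (l.takeWhile (fun x => x.2.2 == g)).map (·.2.1)) :: (pvRuns (l.dropWhile (fun x => x.2.2 == g))).2) := by
  induction l with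
  | nil =>
    intro atg asg g ct cs hcs
    simp [pvFinalA, pvRuns, List.length_pos_iff, hcs]
  | cons x rest ih =>
    intro atg asg g ct cs hcs
    obtain ⟨t, s, gid⟩ := x
    by_cases h : gid = g
    · subst h
      simp only [List.foldl_cons, pvStepA, or_true, if_true]
      rw [ih atg asg gid (ct ++ [t]) (cs ++ [s]) (by simp)]
      simp
    · simp only [List.foldl_cons, pvStepA]
      rw [if_neg (fun hc => by
        rcases hc with hc | hc
        · exact Option.some_ne_none _ hc
        · exact h (Option.some.inj hc).symm)]
      rw [ih (atg ++ [ct]) (asg ++ [cs]) gid [t] [s] (by simp)]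
      have hbeq : ((gid : Int) == g) = false := by simp [h]
      simp [hbeq, pvRuns]

-- ===== VERDICT (by name: the statement is the Claim_ definition above) =====
theorem collate_groups_py_spec : Claim_equal_collate_groups_py := by
  intro true_labels scores group_id_list _
  unfold Spec_collate_groups_py collate_groups_py collate_groups_py_alt
  cases hz : true_labels.zip (scores.zip group_id_list) with
  | nil => simp [pvFinalA, pvRuns]
  | cons x rest =>
    obtain ⟨t, s, g⟩ := x
    simp only [List.foldl_cons, pvStepA, true_or, if_true, List.nil_append]
    rw [pvLoop rest [] [] g [t] [s] (by simp)]
    simp [pvRuns]
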